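-- pv_equiv track=rewrite | github.com/ExploreMaths/CodeVideoRenderer | CodeVideoRenderer/utils.py | stripEmptyLines
-- ===== SOURCE A (Python) =====
-- def stripEmptyLines(text: str) -> str:
--     """
--     Remove empty lines from the beginning and end of a string.
--
--     Args:
--         text (str): The input string to process.
--
--     Returns:
--         str: The string with empty lines removed from the beginning and end.
--     """
--     lines = text.split("\n")
--
--     start = 0
--     while start < len(lines) and lines[start].strip() == '':
--         start += 1
--
--     end = len(lines)
--     while end > start and lines[end - 1].strip() == '':
--         end -= 1
--
--     return '\n'.join(lines[start:end])
-- ===== SOURCE B (Python) =====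
-- def stripEmptyLines(text: str) -> str:
--     lines = text.split("\n")
--     idx = [i for i, l in enumerate(lines) if l.strip() != '']
--     if not idx:
--         return ''
--     return '\n'.join(lines[idx[0]:idx[-1] + 1])
-- ===== Notes on version B (the rewrite author's own statement) =====
-- stated objective: idiomatic
-- what changed: Replaces A's two index-walking while loops (forward from 0, backward from len) with a single comprehension collecting indices of non-blank lines and one inclusive slice between the first and last such index, with an empty-list guard.
import Mathlib
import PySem

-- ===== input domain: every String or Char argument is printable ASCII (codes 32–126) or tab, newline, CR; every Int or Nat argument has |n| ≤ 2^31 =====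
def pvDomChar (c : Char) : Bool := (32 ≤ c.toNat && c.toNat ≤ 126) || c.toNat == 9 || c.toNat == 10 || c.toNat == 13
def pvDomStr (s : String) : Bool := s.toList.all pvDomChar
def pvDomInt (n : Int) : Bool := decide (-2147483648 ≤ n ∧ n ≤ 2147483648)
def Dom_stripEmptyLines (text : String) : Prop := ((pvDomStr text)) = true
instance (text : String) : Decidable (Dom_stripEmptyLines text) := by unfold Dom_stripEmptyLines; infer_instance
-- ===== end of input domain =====

-- B replaces A's two index-walking while loops by one comprehension of non-blank line
-- indices and a single inclusive slice (objective: idiomatic; same O(n) cost).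

-- ===== PORT A =====
/-- `while start < len(lines) and lines[start].strip() == '': start += 1` -/
def seStart (lines : List String) (start : Nat) : Nat :=
  if h : start < lines.length then
    if PySem.Str.strip lines[start] == "" then seStart lines (start + 1) else start
  else start
termination_by lines.length - start

/-- `while end > start and lines[end - 1].strip() == '': end -= 1`.
The loop keeps `start ≤ end ≤ len(lines)`, so `getD _ ""` reads exactly Python's
`lines[end - 1]` on every reachable index. -/
def seEnd (lines : List String) (start : Nat) (e : Nat) : Nat :=
  if h : start < e then
    if PySem.Str.strip (lines.getD (e - 1) "") == "" then seEnd lines start (e - 1) else e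
  else e
termination_by e

def stripEmptyLines (text : String) : String :=
  let lines := (PySem.Str.split? text "\n").getD []   -- sep "\n" ≠ "", so split? is always `some`
  let start := seStart lines 0
  let e := seEnd lines start lines.length
  PySem.Str.join "\n" (PySem.List.slice lines (some (start : Int)) (some (e : Int)))

-- ===== PORT B =====
/-- `[i for i, l in enumerate(lines) if l.strip() != '']` -/
def seIdx (lines : List String) (s : Int) : List Int :=
  (PySem.List.enumerate lines s).filterMap
    (fun il => if ¬ (PySem.Str.strip il.2 == "") then some il.1 else none)

def stripEmptyLines_alt (text : String) : String :=
  let lines := (PySem.Str.split? text "\n").getD []   -- sep "\n" ≠ "", so split? is always `some`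
  let idx := seIdx lines 0
  if idx.isEmpty then ""
  else PySem.Str.join "\n" (PySem.List.slice lines (some idx.head!) (some (idx.getLast! + 1)))

-- ===== PRECONDITION & SPEC =====
def Spec_stripEmptyLines (text : String) (out : String) : Prop := out = stripEmptyLines_alt text
instance (text : String) (out : String) : Decidable (Spec_stripEmptyLines text out) := by unfold Spec_stripEmptyLines; infer_instance

-- ===== CLAIM (what is proved, stated in full; the proofs are below) =====
def Claim_equal_stripEmptyLines : Prop := ∀ (text : String), Dom_stripEmptyLines text → Spec_stripEmptyLines text (stripEmptyLines text)

-- ===== LEMMAS AND PROOFS =====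

/-- the blank-line test both programs use -/
def seBlank (s : String) : Bool := PySem.Str.strip s == ""

theorem seStart_eq (lines : List String) (s : Nat) :
    seStart lines s = s + ((lines.drop s).takeWhile seBlank).length := by
  fun_induction seStart lines s with
  | case1 s h hb ih =>
      rw [ih]
      have hd : lines.drop s = lines[s] :: lines.drop (s+1) := List.drop_eq_getElem_cons h
      rw [hd, List.takeWhile_cons, show seBlank lines[s] = true from hb]
      simp; omega
  | case2 s h hb =>
      have hd : lines.drop s = lines[s] :: lines.drop (s+1) := List.drop_eq_getElem_cons h
      rw [hd, List.takeWhile_cons]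
      simp [show seBlank lines[s] = false by simpa [seBlank] using hb]
  | case3 s h =>
      have : lines.drop s = [] := List.drop_eq_nil_of_le (by omega)
      simp [this]

theorem seEnd_eq (lines : List String) (start e : Nat) (hse : start ≤ e)
    (hel : e ≤ lines.length) :
    seEnd lines start e = e - (((lines.take e).drop start).reverse.takeWhile seBlank).length := by
  fun_induction seEnd lines start e with
  | case1 e h hb ih =>
      have hlt : e - 1 < lines.length := by omega
      have hget : lines[e-1]?.getD "" = lines[e-1] := by simp [List.getElem?_eq_getElem hlt]
      have hseg : (lines.take e).drop start = (lines.take (e-1)).drop start ++ [lines[e-1]] := by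
        have h1 : lines.take e = lines.take (e-1) ++ [lines[e-1]] := by
          have := List.take_add_one (l := lines) (i := e-1)
          rw [show e - 1 + 1 = e by omega] at this
          simp [this, hlt]
        rw [h1, List.drop_append_of_le_length (by simp; omega)]
      rw [ih (by omega) (by omega), hseg]
      rw [List.reverse_append]
      simp only [List.reverse_cons, List.reverse_nil, List.nil_append, List.singleton_append]
      rw [List.takeWhile_cons_of_pos (by simpa [seBlank, hget] using hb)]
      simp only [List.length_cons]
      have : (((lines.take (e-1)).drop start).reverse.takeWhile seBlank).length ≤ e - 1 - start := by
        have h1 := (List.takeWhile_sublist (l := ((lines.take (e-1)).drop start).reverse) seBlank).length_le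
        have h2 : ((lines.take (e-1)).drop start).reverse.length = e - 1 - start := by
          simp; omega
        omega
      omega
  | case2 e h hb =>
      have hlt : e - 1 < lines.length := by omega
      have hget : lines[e-1]?.getD "" = lines[e-1] := by simp [List.getElem?_eq_getElem hlt]
      have hseg : (lines.take e).drop start = (lines.take (e-1)).drop start ++ [lines[e-1]] := by
        have h1 : lines.take e = lines.take (e-1) ++ [lines[e-1]] := by
          have := List.take_add_one (l := lines) (i := e-1)
          rw [show e - 1 + 1 = e by omega] at this
          simp [this, hlt]
        rw [h1, List.drop_append_of_le_length (by simp; omega)]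
      rw [hseg, List.reverse_append]
      simp only [List.reverse_cons, List.reverse_nil, List.nil_append, List.singleton_append]
      rw [List.takeWhile_cons_of_neg (by simpa [seBlank, hget] using hb)]
      simp
  | case3 e h =>
      have : start = e := by omega
      subst this
      simp

theorem seIdx_cons (x : String) (xs : List String) (s : Int) :
    seIdx (x :: xs) s = (if seBlank x then [] else [s]) ++ seIdx xs (s + 1) := by
  simp only [seIdx, PySem.List.enumerate_cons, List.filterMap_cons]
  by_cases hx : seBlank x
  · simp only [seBlank] at hx; simp [seBlank, hx]
  · simp only [seBlank] at hx; simp [seBlank, hx]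

theorem seIdx_nil_iff (lines : List String) (s : Int) :
    seIdx lines s = [] ↔ lines.all seBlank := by
  induction lines generalizing s with
  | nil => simp [seIdx, PySem.List.enumerate]
  | cons x xs ih =>
      rw [seIdx_cons]
      by_cases hx : seBlank x <;> simp [hx, ih]

theorem seIdx_head (lines : List String) (s : Int) (h : ¬ lines.all seBlank) :
    (seIdx lines s).head! = s + ((lines.takeWhile seBlank).length : Int) := by
  induction lines generalizing s with
  | nil => simp at h
  | cons x xs ih =>
      rw [seIdx_cons]
      by_cases hx : seBlank x
      · have hxs : ¬ xs.all seBlank := by simp [hx] at h; simpa using h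
        simp only [hx, if_true, List.nil_append]
        rw [ih (s+1) hxs, List.takeWhile_cons_of_pos hx]
        simp; ring
      · simp [hx, List.takeWhile_cons_of_neg hx]

theorem takeWhile_ne_all_length (p : String → Bool) (l : List String)
    (h : ¬ l.all p) : (l.takeWhile p).length ≠ l.length := by
  intro hc
  exact h (List.all_eq_true.2 (fun a ha =>
    List.mem_takeWhile_imp (l := l) (by
      rw [(List.takeWhile_sublist p).eq_of_length hc]; exact ha)))

theorem seIdx_last? (lines : List String) (s : Int) (h : ¬ lines.all seBlank) :
    (seIdx lines s).getLast? = some (s + (lines.length : Int) - 1 - ((lines.reverse.takeWhile seBlank).length : Int)) := by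
  induction lines generalizing s with
  | nil => simp at h
  | cons x xs ih =>
      rw [seIdx_cons]
      by_cases hxs : xs.all seBlank
      · have hx : ¬ seBlank x = true := by
          intro hx; exact h (by simp [hx, hxs])
        have hnil : seIdx xs (s+1) = [] := (seIdx_nil_iff xs (s+1)).2 hxs
        have htw : xs.reverse.takeWhile seBlank = xs.reverse :=
          List.takeWhile_eq_self_iff.2 (fun a ha =>
            List.all_eq_true.1 hxs a (by simpa using ha))
        rw [List.reverse_cons, List.takeWhile_append]
        simp only [htw, List.length_reverse]
        rw [List.takeWhile_cons_of_neg hx]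
        simp [hx, hnil]
        ring
      · have hne : seIdx xs (s+1) ≠ [] := fun hc => hxs ((seIdx_nil_iff xs (s+1)).1 hc)
        have hlen : (xs.reverse.takeWhile seBlank).length ≠ xs.reverse.length := by
          have := takeWhile_ne_all_length seBlank xs.reverse (by simpa using hxs)
          simpa using this
        rw [List.getLast?_append_of_ne_nil _ hne, ih (s+1) hxs,
          List.reverse_cons, List.takeWhile_append, if_neg hlen]
        congr 1
        simp only [List.length_cons]
        push_cast; ring

theorem getLast!_eq_of_getLast? (l : List Int) (a : Int) (h : l.getLast? = some a) :
    l.getLast! = a := by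
  cases l with
  | nil => simp at h
  | cons x xs =>
      rw [List.getLast?_eq_some_getLast (by simp)] at h
      simp only [Option.some_inj] at h
      simp [List.getLast!, h]

/-- the two line-level computations agree on every list of lines -/
theorem lines_level (lines : List String) :
    PySem.Str.join "\n" (PySem.List.slice lines (some ((seStart lines 0 : Nat) : Int))
      (some ((seEnd lines (seStart lines 0) lines.length : Nat) : Int)))
    = (if (seIdx lines 0).isEmpty then ""
       else PySem.Str.join "\n" (PySem.List.slice lines (some (seIdx lines 0).head!)
              (some ((seIdx lines 0).getLast! + 1)))) := by
  have hstart : seStart lines 0 = (lines.takeWhile seBlank).length := by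
    rw [seStart_eq]; simp
  by_cases hall : lines.all seBlank
  · -- every line blank: both sides are the empty string
    have ht : lines.takeWhile seBlank = lines := List.takeWhile_eq_self_iff.2
      (fun a ha => List.all_eq_true.1 hall a ha)
    have hidx : (seIdx lines 0).isEmpty := by
      simp [List.isEmpty_iff, seIdx_nil_iff, hall]
    rw [if_pos hidx, hstart, ht]
    have hend : seEnd lines lines.length lines.length = lines.length := by
      unfold seEnd; simp
    rw [hend]
    rw [PySem.List.slice_toNat _ (by positivity) (by positivity)]
    simp [PySem.Str.join]
  · -- some non-blank line
    set t := (lines.takeWhile seBlank).length with hts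
    have htle : t ≤ lines.length := (List.takeWhile_sublist seBlank).length_le
    have hdrop : lines.drop t = lines.dropWhile seBlank := by
      conv_lhs => rw [← List.takeWhile_append_dropWhile (p := seBlank) (l := lines)]
      rw [List.drop_left' hts.symm]
    have hrev : lines.reverse = (lines.dropWhile seBlank).reverse ++ (lines.takeWhile seBlank).reverse := by
      conv_lhs => rw [← List.takeWhile_append_dropWhile (p := seBlank) (l := lines)]
      rw [List.reverse_append]
    have hdw_not_all : ¬ (lines.dropWhile seBlank).reverse.all seBlank := by
      intro hc
      apply hall
      rw [← List.takeWhile_append_dropWhile (p := seBlank) (l := lines)]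
      rw [List.all_append, Bool.and_eq_true]
      exact ⟨List.all_eq_true.2 (fun a ha => List.mem_takeWhile_imp ha),
        List.all_eq_true.2 (fun a ha => List.all_eq_true.1 hc a (by simpa using ha))⟩
    have hlen_ne : ((lines.dropWhile seBlank).reverse.takeWhile seBlank).length
        ≠ (lines.dropWhile seBlank).reverse.length :=
      takeWhile_ne_all_length seBlank _ hdw_not_all
    set r := ((lines.dropWhile seBlank).reverse.takeWhile seBlank).length with hrs
    have hrfull : (lines.reverse.takeWhile seBlank).length = r := by
      rw [hrev, List.takeWhile_append, if_neg hlen_ne]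
    have hrle : r ≤ lines.length := by
      have h1 : r ≤ (lines.dropWhile seBlank).reverse.length :=
        (List.takeWhile_sublist seBlank).length_le
      have h2 := (List.dropWhile_sublist (l := lines) seBlank).length_le
      simp at h1; omega
    have hend : seEnd lines t lines.length = lines.length - r := by
      rw [seEnd_eq lines t lines.length htle (le_refl _)]
      rw [List.take_length, hdrop]
    have hne : seIdx lines 0 ≠ [] := fun hc => hall ((seIdx_nil_iff lines 0).1 hc)
    rw [if_neg (by simpa [List.isEmpty_iff] using hne)]
    rw [hstart, hend]
    rw [seIdx_head lines 0 hall,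
      getLast!_eq_of_getLast? _ _ (seIdx_last? lines 0 hall)]
    have hb1 : (0 : Int) + ((lines.takeWhile seBlank).length : Int) = ((t : Nat) : Int) := by
      simp [hts]
    have hb2 : (0 : Int) + (lines.length : Int) - 1 - ((lines.reverse.takeWhile seBlank).length : Int) + 1
        = ((lines.length - r : Nat) : Int) := by
      rw [hrfull]; omega
    rw [hb1, hb2]

-- ===== VERDICT (by name: the statement is the Claim_ definition above) =====
theorem stripEmptyLines_spec : Claim_equal_stripEmptyLines := by
  intro text _
  unfold Spec_stripEmptyLines stripEmptyLines stripEmptyLines_alt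
  exact lines_level ((PySem.Str.split? text "\n").getD [])
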